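-- pv_equiv track=rewrite | github.com/mikulleo/RestbusSim-Converter | parserPy.py | get_array_dims
-- ===== SOURCE A (Python) =====
-- def get_array_dims(array_brackets):
--     array_dims = []
--     array_split = array_brackets.split('[')
--     array_split = array_split[1:]
--     for array_split_i in array_split:
--         array_split_i = array_split_i.split(']')
--         array_dims.append(array_split_i[0])
--     #if len(array_dims) == 1:
--     #    if self.is_number(array_dims[0]):
--     #        dim = int(array_dims[0])-1
--     #        dim = str(dim)
--     #    else:
--     #        dim = "%s - 1" % array_dims[0]
--     #    self.string += "%s)" % dim
--     #else:
--     #    for i in range(0,len(array_dims)):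
--     #        if self.is_number(array_dims[i]):
--     #            dim = int(array_dims[i])-1
--     #            dim = str(dim)
--     #        else:
--     #            dim = "%s - 1" % array_dims[i]
--     #        if not i == (len(array_dims)-1):
--     #            self.string += "%s," % dim
--     #        else:
--     #            self.string += "%s)" % dim
--
--     return array_dims
-- ===== SOURCE B (Python) =====
-- import re
--
-- def get_array_dims(array_brackets):
--     # One regex scan: each '[' starts a capture of the following run of
--     # non-bracket characters (stops at ']' or the next '[' or end of string).
--     return re.findall(r'\[([^\[\]]*)', array_brackets)
-- ===== Notes on version B (the rewrite author's own statement) =====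
-- stated objective: idiomatic
-- what changed: Replaces A's split-on-opening-bracket loop with its per-segment second split by a single regular-expression findall scan that captures the run of non-bracket characters after each opening bracket.
import Mathlib
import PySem

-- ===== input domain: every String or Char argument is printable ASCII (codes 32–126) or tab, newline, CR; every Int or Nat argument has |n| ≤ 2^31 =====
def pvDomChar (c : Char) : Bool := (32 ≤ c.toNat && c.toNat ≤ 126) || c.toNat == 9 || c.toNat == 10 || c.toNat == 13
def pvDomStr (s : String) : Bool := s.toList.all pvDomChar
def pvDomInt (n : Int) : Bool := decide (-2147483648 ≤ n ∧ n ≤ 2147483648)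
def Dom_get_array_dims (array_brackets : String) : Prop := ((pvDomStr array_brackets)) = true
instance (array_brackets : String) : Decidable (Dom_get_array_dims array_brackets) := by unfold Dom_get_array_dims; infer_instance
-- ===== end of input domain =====

-- B replaces A's split-on-'[' loop by a single regex scan (re.findall): same values, idiomatic one-liner.

-- ===== PORT A =====
-- array_split = array_brackets.split('['); array_split = array_split[1:]
-- for each piece: append piece.split(']')[0].  Python split always returns a
-- nonempty list, so the [0] is its head (headD [] never takes the default).
def get_array_dims (array_brackets : String) : List String :=
  let array_split := PySem.List.slice (PySem.Chars.splitOn array_brackets.toList ['[']) (some 1) none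
  array_split.foldl
    (fun array_dims array_split_i =>
      array_dims ++ [String.mk ((PySem.Chars.splitOn array_split_i [']']).headD [])]) []

-- ===== PORT B =====
-- Port of re.findall(r'\[([^\[\]]*)', s): scan left to right; at each '[' the
-- group captures the maximal following run of non-bracket characters and the
-- scan resumes after the match end (i.e. after that run).
def pvCapChar (d : Char) : Bool := d != '[' && d != ']'

def pvFindall : List Char → List (List Char)
  | [] => []
  | c :: rest =>
      if c = '[' then
        rest.takeWhile pvCapChar :: pvFindall (rest.dropWhile pvCapChar)
      else
        pvFindall rest
termination_by l => l.length
decreasing_by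
  · simpa using Nat.lt_succ_of_le (List.length_dropWhile_le _ _)
  · simp

def get_array_dims_alt (array_brackets : String) : List String :=
  (pvFindall array_brackets.toList).map String.mk

-- ===== PRECONDITION & SPEC =====
def Spec_get_array_dims (array_brackets : String) (out : List String) : Prop := out = get_array_dims_alt array_brackets
instance (array_brackets : String) (out : List String) : Decidable (Spec_get_array_dims array_brackets out) := by unfold Spec_get_array_dims; infer_instance

-- ===== CLAIM (what is proved, stated in full; the proofs are below) =====
def Claim_equal_get_array_dims : Prop := ∀ (array_brackets : String), Dom_get_array_dims array_brackets → Spec_get_array_dims array_brackets (get_array_dims array_brackets)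

-- ===== LEMMAS AND PROOFS =====

-- simple structural splitter on one character, used to characterise Chars.splitOn
def pvSp (c : Char) : List Char → List (List Char)
  | [] => [[]]
  | d :: rest =>
      if d = c then [] :: pvSp c rest
      else
        match pvSp c rest with
        | [] => [[d]]
        | p :: ps => (d :: p) :: ps

theorem pvSp_ne_nil (c : Char) (l : List Char) : pvSp c l ≠ [] := by
  cases l with
  | nil => simp [pvSp]
  | cons d rest =>
    simp only [pvSp]
    split
    · simp
    · split <;> simp

theorem pv_go_eq (c : Char) (fuel : Nat) (l cur : List Char) (acc : List (List Char))
    (h : l.length ≤ fuel) :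
    PySem.Chars.splitOn.go [c] fuel l cur acc
      = acc.reverse ++ (pvSp c l).modifyHead (cur.reverse ++ ·) := by
  induction fuel generalizing l cur acc with
  | zero =>
    have hl : l = [] := List.eq_nil_of_length_eq_zero (Nat.le_zero.mp h)
    subst hl
    simp [PySem.Chars.splitOn.go, pvSp]
  | succ fuel ih =>
    cases l with
    | nil => simp [PySem.Chars.splitOn.go, pvSp]
    | cons d rest =>
      by_cases hdc : d = c
      · subst hdc
        have : PySem.Chars.splitOn.go [d] (fuel + 1) (d :: rest) cur acc
            = PySem.Chars.splitOn.go [d] fuel rest [] (cur.reverse :: acc) := by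
          simp [PySem.Chars.splitOn.go, List.isPrefixOf]
        rw [this, ih rest [] (cur.reverse :: acc) (by simpa using Nat.le_of_succ_le_succ h)]
        obtain ⟨p, ps, hps⟩ := List.exists_cons_of_ne_nil (pvSp_ne_nil d rest)
        simp [pvSp, hps]
      · have : PySem.Chars.splitOn.go [c] (fuel + 1) (d :: rest) cur acc
            = PySem.Chars.splitOn.go [c] fuel rest (d :: cur) acc := by
          simp [PySem.Chars.splitOn.go, List.isPrefixOf, Ne.symm hdc]
        rw [this, ih rest (d :: cur) acc (by simpa using Nat.le_of_succ_le_succ h)]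
        obtain ⟨p, ps, hps⟩ := List.exists_cons_of_ne_nil (pvSp_ne_nil c rest)
        simp [pvSp, hdc, hps]

theorem pv_splitOn_eq (c : Char) (l : List Char) :
    PySem.Chars.splitOn l [c] = pvSp c l := by
  have h := pv_go_eq c (l.length + 1) l [] [] (Nat.le_succ _)
  obtain ⟨p, ps, hps⟩ := List.exists_cons_of_ne_nil (pvSp_ne_nil c l)
  simpa [PySem.Chars.splitOn, hps] using h

theorem pvSp_head (c : Char) (l : List Char) :
    (pvSp c l).headD [] = l.takeWhile (· != c) := by
  induction l with
  | nil => simp [pvSp]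
  | cons d rest ih =>
    by_cases hdc : d = c
    · subst hdc; simp [pvSp, List.takeWhile]
    · obtain ⟨p, ps, hps⟩ := List.exists_cons_of_ne_nil (pvSp_ne_nil c rest)
      have hbne : (d != c) = true := by simpa using hdc
      simp only [pvSp, if_neg hdc, hps]
      simp only [hps, List.headD_cons] at ih
      simp [hbne, ih]

theorem pvSp_mem (c : Char) (l : List Char) (seg : List Char) (h : seg ∈ pvSp c l) :
    c ∉ seg := by
  induction l generalizing seg with
  | nil =>
    simp [pvSp] at h
    simp [h]
  | cons d rest ih =>
    by_cases hdc : d = c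
    · subst hdc
      simp [pvSp] at h
      rcases h with rfl | h
      · simp
      · exact ih seg h
    · obtain ⟨p, ps, hps⟩ := List.exists_cons_of_ne_nil (pvSp_ne_nil c rest)
      simp only [pvSp, if_neg hdc, hps, List.mem_cons] at h
      rcases h with rfl | h
      · intro hc
        rcases List.mem_cons.mp hc with rfl | hc
        · exact hdc rfl
        · exact ih p (by simp [hps]) hc
      · exact ih seg (by simp [hps, h])

theorem pv_takeWhile_seg (seg : List Char) (h : '[' ∉ seg) :
    seg.takeWhile (· != ']') = seg.takeWhile pvCapChar := by
  induction seg with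
  | nil => simp
  | cons d rest ih =>
    have hd : d ≠ '[' := by intro hh; exact h (by simp [hh])
    have hrest : '[' ∉ rest := fun hh => h (by simp [hh])
    simp only [List.takeWhile, pvCapChar]
    have : (d != '[') = true := by simpa using hd
    rw [this]
    simp only [Bool.true_and]
    cases hdd : (d != ']') <;> simp [ih hrest]

theorem pv_skip (cap t : List Char) (h : ∀ d ∈ cap, d ≠ '[') :
    pvFindall (cap ++ t) = pvFindall t := by
  induction cap with
  | nil => simp
  | cons d rest ih =>
    have hd : d ≠ '[' := h d (by simp)
    rw [List.cons_append, pvFindall, if_neg hd]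
    exact ih (fun x hx => h x (by simp [hx]))

theorem pv_findall_eq (l : List Char) :
    pvFindall l = ((pvSp '[' l).tail).map (List.takeWhile pvCapChar) := by
  induction l with
  | nil => simp [pvFindall, pvSp]
  | cons d rest ih =>
    by_cases hd : d = '['
    · subst hd
      rw [pvFindall, if_pos rfl]
      obtain ⟨p, ps, hps⟩ := List.exists_cons_of_ne_nil (pvSp_ne_nil '[' rest)
      have hp : p = rest.takeWhile (· != '[') := by
        have := pvSp_head '[' rest
        simpa [hps] using this
      have hcap : ∀ x ∈ rest.takeWhile pvCapChar, x ≠ '[' := by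
        intro x hx
        have := List.mem_takeWhile_imp hx
        simp [pvCapChar] at this
        exact this.1
      have hskip : pvFindall rest = pvFindall (rest.dropWhile pvCapChar) := by
        conv_lhs => rw [← List.takeWhile_append_dropWhile (p := pvCapChar) (l := rest)]
        exact pv_skip _ _ hcap
      have htk : List.takeWhile pvCapChar p = rest.takeWhile pvCapChar := by
        rw [hp, List.takeWhile_takeWhile]
        congr 1
        funext a
        by_cases h1 : a = '[' <;> by_cases h2 : a = ']' <;> simp [pvCapChar, h1, h2]
      have hsp : pvSp '[' ('[' :: rest) = [] :: p :: ps := by simp [pvSp, hps]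
      rw [hsp]
      simp only [List.tail_cons, List.map_cons]
      rw [htk, ← hskip, ih, hps]
      simp
    · rw [pvFindall, if_neg hd]
      obtain ⟨p, ps, hps⟩ := List.exists_cons_of_ne_nil (pvSp_ne_nil '[' rest)
      simp only [pvSp, if_neg hd, hps, List.tail_cons]
      rw [ih, hps]
      simp

theorem pv_foldl_append_map {α β : Type} (f : α → β) (l : List α) (acc : List β) :
    l.foldl (fun a x => a ++ [f x]) acc = acc ++ l.map f := by
  induction l generalizing acc with
  | nil => simp
  | cons x xs ih => simp [List.foldl_cons, ih]

-- ===== VERDICT (by name: the statement is the Claim_ definition above) =====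
theorem get_array_dims_spec : Claim_equal_get_array_dims := by
  intro s _
  unfold Spec_get_array_dims get_array_dims get_array_dims_alt
  rw [PySem.List.slice_from_one, pv_splitOn_eq, pv_foldl_append_map, pv_findall_eq]
  simp only [List.nil_append, List.map_map]
  apply List.map_congr_left
  intro seg hseg
  have hmem : seg ∈ pvSp '[' s.toList := List.mem_of_mem_tail hseg
  have hnb : '[' ∉ seg := pvSp_mem '[' s.toList seg hmem
  rw [pv_splitOn_eq, pvSp_head, pv_takeWhile_seg seg hnb]
  rfl
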